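-- pv_equiv track=rewrite | github.com/BDLab-G4/CanLncG4 | python_server/tools.py | numg_calc
-- ===== SOURCE A (Python) =====
-- def numg_calc(seq):
--     numg = None
--     score = []
--     i = 0
--
--     # this loop calcs sequence score non-G: 0, consecutive Gs: cumulative score CAAGGGAGGT -> 0003020
--     while i < len(seq):
--         if  seq[i] == "G":
--             t = 0
--             while(seq[t+i]) == "G":
--                 t += 1
--
--                 if t+i>=len(seq):
--                     break
--
--             score += [t]
--             i += t
--         else:
--             score += [0]
--             i += 1
--
--     main_score = score
--
--     for i in range(4,0,-1):
--         count = 0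
--         for j in score:
--             if j == i:
--                 count += 1
--         if count >= 4:
--             numg = i
--             break
--         else:
--             temp = []
--             j = 0
--             for j in range(len(main_score)):
--                 if main_score[j] >= i and i> 1:
--                     temp += [i]*(main_score[j]//(i))
--
--                 else:
--                     temp += [main_score[j]]
--
--             count = 0
--             for j in temp:
--                 if j == i:
--                     count += 1
--             if count >= 4:
--                 numg = i
--                 break
--
--             # score = temp
--
--     if numg is None:
--         return 0, [-1]
--     else:
--         return numg, [0, 0, 0, 0]
-- ===== SOURCE B (Python) =====
-- def numg_calc(seq):
--     # one pass: collect lengths of maximal G-runs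
--     runs = []
--     cur = 0
--     for ch in seq:
--         if ch == "G":
--             cur += 1
--         else:
--             if cur > 0:
--                 runs.append(cur)
--             cur = 0
--     if cur > 0:
--         runs.append(cur)
--
--     for k in (4, 3, 2):
--         if sum(r // k for r in runs) >= 4:
--             return k, [0, 0, 0, 0]
--     if sum(1 for r in runs if r == 1) >= 4:
--         return 1, [0, 0, 0, 0]
--     return 0, [-1]
-- ===== Notes on version B (the rewrite author's own statement) =====
-- stated objective: simpler
-- what changed: B extracts G-run lengths in one accumulator pass and decides each level k in (4,3,2) by the single test sum(r//k) >= 4 (exact count of length-1 runs for k=1), replacing A's index-advancing scan with an inner re-scan and its per-level exact-count-then-temp-list-rebuild-then-recount machinery.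
import Mathlib
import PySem

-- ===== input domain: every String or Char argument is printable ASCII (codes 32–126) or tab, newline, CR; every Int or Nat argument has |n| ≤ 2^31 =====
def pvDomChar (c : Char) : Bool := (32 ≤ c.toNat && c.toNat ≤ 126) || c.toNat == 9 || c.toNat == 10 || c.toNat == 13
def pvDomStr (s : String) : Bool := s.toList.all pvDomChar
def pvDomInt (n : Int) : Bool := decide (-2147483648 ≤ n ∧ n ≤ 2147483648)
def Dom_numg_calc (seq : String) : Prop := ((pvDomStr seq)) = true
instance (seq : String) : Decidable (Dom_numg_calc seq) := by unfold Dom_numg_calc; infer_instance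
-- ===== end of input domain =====

-- B replaces A's index-advancing scan (with an inner re-scan and per-level exact-count /
-- temp-list rebuild / recount machinery) by one accumulator pass collecting G-run lengths
-- and a direct floor-division sum test per level; objective: simpler.

-- ===== PORT A =====
-- inner 'while seq[t+i]=="G": t+=1; if t+i>=len(seq): break' — the break fires exactly
-- when t+i reaches the length, so testing the bound before the character is exact
def numgInner (s : List Char) (i t : Nat) : Nat :=
  if h : t + i < s.length then
    if s[t + i] = 'G' then numgInner s i (t + 1) else t
  else t
termination_by s.length - (t + i)
decreasing_by omega

-- the port's outer loop needs t ≥ 1 to terminate, so these two stay above it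
theorem numgInner_ge (s : List Char) (i t : Nat) : t ≤ numgInner s i t := by
  rw [numgInner]
  split
  · split
    · exact le_trans (by omega) (numgInner_ge s i (t + 1))
    · exact le_refl t
  · exact le_refl t
termination_by s.length - (t + i)
decreasing_by omega

theorem numgInner_pos (s : List Char) (i : Nat) (h : i < s.length) (hg : s[i] = 'G') :
    1 ≤ numgInner s i 0 := by
  rw [numgInner]
  have h0 : 0 + i < s.length := by omega
  simp only [h0, dif_pos]
  have : s[0 + i]'h0 = 'G' := by simpa using hg
  rw [if_pos this]
  exact numgInner_ge s i 1

-- outer 'while i < len(seq)' building score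
def numgOuter (s : List Char) (i : Nat) (score : List Int) : List Int :=
  if h : i < s.length then
    if hg : s[i] = 'G' then
      numgOuter s (i + numgInner s i 0) (score ++ [(numgInner s i 0 : Int)])
    else
      numgOuter s (i + 1) (score ++ [0])
  else score
termination_by s.length - i
decreasing_by
  · have := numgInner_pos s i h hg; omega
  · omega

-- 'count = 0; for j in score: if j == i: count += 1'
def countEq (score : List Int) (i : Int) : Int :=
  score.foldl (fun count j => if j = i then count + 1 else count) 0

-- temp-building pass (iterating the elements of main_score in order, as the index loop does)
def buildTemp (score : List Int) (i : Int) : List Int :=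
  score.foldl
    (fun temp v =>
      if v ≥ i ∧ i > 1 then temp ++ PySem.List.pyRepeat [i] (PySem.Int.floordiv v i)
      else temp ++ [v]) []

-- 'for i in range(4,0,-1): …' with its two early 'break's
def searchA (score : List Int) : List Int → Option Int
  | [] => none
  | i :: rest =>
    if countEq score i ≥ 4 then some i
    else if countEq (buildTemp score i) i ≥ 4 then some i
    else searchA score rest

def numg_calc (seq : String) : Int × List Int :=
  let score := numgOuter seq.toList 0 []
  match searchA score (PySem.List.pyRange 4 0 (-1)) with
  | none => (0, [-1])
  | some numg => (numg, [0, 0, 0, 0])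

-- ===== PORT B =====
def runsStep (p : List Int × Int) (c : Char) : List Int × Int :=
  if c = 'G' then (p.1, p.2 + 1) else (if p.2 > 0 then p.1 ++ [p.2] else p.1, 0)

-- one pass collecting the lengths of maximal G-runs
def gruns (s : List Char) : List Int :=
  let p := s.foldl runsStep ([], 0)
  if p.2 > 0 then p.1 ++ [p.2] else p.1

-- 'sum(r // k for r in runs)'
def sumDiv (runs : List Int) (k : Int) : Int :=
  runs.foldl (fun acc r => acc + PySem.Int.floordiv r k) 0

-- 'sum(1 for r in runs if r == 1)'
def countOnes (runs : List Int) : Int :=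
  runs.foldl (fun acc r => if r = 1 then acc + 1 else acc) 0

-- 'for k in (4, 3, 2): if sum(...) >= 4: return k, …'
def findK (runs : List Int) : List Int → Option Int
  | [] => none
  | k :: rest => if sumDiv runs k ≥ 4 then some k else findK runs rest

def numg_calc_alt (seq : String) : Int × List Int :=
  let runs := gruns seq.toList
  match findK runs [4, 3, 2] with
  | some k => (k, [0, 0, 0, 0])
  | none => if countOnes runs ≥ 4 then (1, [0, 0, 0, 0]) else (0, [-1])

-- ===== PRECONDITION & SPEC =====
def Spec_numg_calc (seq : String) (out : Int × List Int) : Prop := out = numg_calc_alt seq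
instance (seq : String) (out : Int × List Int) : Decidable (Spec_numg_calc seq out) := by unfold Spec_numg_calc; infer_instance

-- ===== CLAIM (what is proved, stated in full; the proofs are below) =====
def Claim_equal_numg_calc : Prop := ∀ (seq : String), Dom_numg_calc seq → Spec_numg_calc seq (numg_calc seq)

-- ===== LEMMAS AND PROOFS =====

-- length of the leading block of 'G's
def leadG : List Char → Nat
  | [] => 0
  | c :: cs => if c = 'G' then leadG cs + 1 else 0

-- reference form of A's score list
def scoreL : List Char → List Int
  | [] => []
  | c :: cs =>
    if c = 'G' then ((leadG cs + 1 : Nat) : Int) :: scoreL (cs.drop (leadG cs))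
    else 0 :: scoreL cs
termination_by s => s.length
decreasing_by
  all_goals simp only [List.length_cons, List.length_drop]; omega

-- reference form of B's run list
def runsSpec : Int → List Char → List Int
  | cur, [] => if cur > 0 then [cur] else []
  | cur, c :: cs =>
    if c = 'G' then runsSpec (cur + 1) cs
    else (if cur > 0 then [cur] else []) ++ runsSpec 0 cs

theorem numgInner_eq (s : List Char) (i t : Nat) :
    numgInner s i t = t + leadG (s.drop (t + i)) := by
  rw [numgInner]
  split
  · rename_i h
    have hd : s.drop (t + i) = s[t + i] :: s.drop (t + i + 1) := List.drop_eq_getElem_cons h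
    split
    · rename_i hg
      rw [numgInner_eq s i (t + 1), hd]
      have harg : t + 1 + i = t + i + 1 := by omega
      rw [harg]
      simp only [leadG, hg, if_pos]
      omega
    · rename_i hg
      rw [hd]; simp [leadG, hg]
  · rename_i h
    have : s.drop (t + i) = [] := List.drop_eq_nil_of_le (by omega)
    simp [this, leadG]
termination_by s.length - (t + i)
decreasing_by omega

theorem numgOuter_eq (s : List Char) :
    ∀ n i acc, s.length - i ≤ n → numgOuter s i acc = acc ++ scoreL (s.drop i) := by
  intro n
  induction n with
  | zero =>
    intro i acc h
    rw [numgOuter]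
    have hi : ¬ i < s.length := by omega
    rw [dif_neg hi]
    have : s.drop i = [] := List.drop_eq_nil_of_le (by omega)
    simp [this, scoreL]
  | succ n ih =>
    intro i acc h
    rw [numgOuter]
    split
    · rename_i hlt
      have hd : s.drop i = s[i] :: s.drop (i + 1) := List.drop_eq_getElem_cons hlt
      split
      · rename_i hg
        have ht : numgInner s i 0 = leadG (s.drop (i + 1)) + 1 := by
          rw [numgInner_eq]
          simp only [Nat.zero_add, hd, leadG, hg, if_pos]
        rw [ih (i + numgInner s i 0) _ (by omega)]
        rw [hd]
        rw [scoreL]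
        simp only [hg, if_pos, ht]
        have hdrop : s.drop (i + (leadG (s.drop (i + 1)) + 1)) =
            (s.drop (i + 1)).drop (leadG (s.drop (i + 1))) := by
          rw [List.drop_drop]
          congr 1
          omega
        rw [hdrop]
        simp
      · rename_i hg
        rw [ih (i + 1) _ (by omega), hd, scoreL]
        simp [hg]
    · rename_i hi
      have : s.drop i = [] := List.drop_eq_nil_of_le (by omega)
      simp [this, scoreL]

theorem gruns_fold (cs : List Char) :
    ∀ runs cur,
      (let p := cs.foldl runsStep (runs, cur);
       if p.2 > 0 then p.1 ++ [p.2] else p.1) = runs ++ runsSpec cur cs := by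
  induction cs with
  | nil =>
    intro runs cur
    simp only [List.foldl_nil, runsSpec]
    split <;> simp
  | cons c cs ih =>
    intro runs cur
    simp only [List.foldl_cons, runsStep, runsSpec]
    by_cases hc : c = 'G'
    · simp only [hc, if_pos]
      exact ih runs (cur + 1)
    · rw [if_neg hc, if_neg hc]
      rw [ih _ 0]
      split <;> simp

theorem gruns_eq (s : List Char) : gruns s = runsSpec 0 s := by
  have := gruns_fold s [] 0
  simpa [gruns] using this

theorem runsSpec_pos (cs : List Char) :
    ∀ k : Int, 1 ≤ k →
      runsSpec k cs = (k + (leadG cs : Int)) :: runsSpec 0 (cs.drop (leadG cs)) := by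
  induction cs with
  | nil =>
    intro k hk
    simp only [runsSpec, leadG, List.drop_nil]
    rw [if_pos (by omega)]
    simp
  | cons c cs ih =>
    intro k hk
    by_cases hc : c = 'G'
    · subst hc
      rw [show runsSpec k ('G' :: cs) = runsSpec (k + 1) cs from by simp [runsSpec],
          ih (k + 1) (by omega)]
      have hl : leadG ('G' :: cs) = leadG cs + 1 := by simp [leadG]
      rw [hl, List.drop_succ_cons]
      congr 1
      push_cast
      ring
    · have h0 : leadG (c :: cs) = 0 := by simp [leadG, hc]
      rw [h0, List.drop_zero]
      rw [show runsSpec k (c :: cs) = (if k > 0 then [k] else []) ++ runsSpec 0 cs from by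
        simp [runsSpec, hc]]
      rw [if_pos (by omega : k > 0)]
      have : runsSpec 0 (c :: cs) = runsSpec 0 cs := by simp [runsSpec, hc]
      rw [this]
      simp

-- every entry of scoreL is a nonnegative integer
theorem scoreL_nonneg (n : Nat) : ∀ cs : List Char, cs.length ≤ n → ∀ v ∈ scoreL cs, 0 ≤ v := by
  induction n with
  | zero =>
    intro cs h v hv
    have : cs = [] := List.eq_nil_of_length_eq_zero (by omega)
    subst this; simp [scoreL] at hv
  | succ n ih =>
    intro cs h v hv
    match cs with
    | [] => simp [scoreL] at hv
    | c :: cs =>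
      rw [scoreL] at hv
      split at hv
      · rcases List.mem_cons.mp hv with h1 | h1
        · subst h1; positivity
        · exact ih _ (by simp only [List.length_drop]; simp only [List.length_cons] at h; omega) v h1
      · rcases List.mem_cons.mp hv with h1 | h1
        · subst h1; exact le_refl 0
        · exact ih cs (by simp at h; omega) v h1

-- B's runs are exactly the nonzero entries of A's score, in order
theorem runsSpec_eq_filter (n : Nat) :
    ∀ cs : List Char, cs.length ≤ n → runsSpec 0 cs = (scoreL cs).filter (fun v => v ≠ 0) := by
  induction n with
  | zero =>
    intro cs h
    have : cs = [] := List.eq_nil_of_length_eq_zero (by omega)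
    subst this; simp [runsSpec, scoreL]
  | succ n ih =>
    intro cs h
    match cs with
    | [] => simp [runsSpec, scoreL]
    | c :: cs =>
      by_cases hc : c = 'G'
      · rw [scoreL]
        rw [if_pos hc]
        have hrun : runsSpec 0 (c :: cs) = runsSpec 1 cs := by simp [runsSpec, hc]
        rw [hrun, runsSpec_pos cs 1 (le_refl 1)]
        rw [ih ((cs.drop (leadG cs)))
            (by simp only [List.length_drop]; simp only [List.length_cons] at h; omega)]
        have hne : (((leadG cs + 1 : Nat) : Int) ≠ 0) := by positivity
        rw [List.filter_cons_of_pos (by simpa using hne)]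
        congr 1
        push_cast; ring
      · rw [scoreL, if_neg hc]
        have : runsSpec 0 (c :: cs) = runsSpec 0 cs := by simp [runsSpec, hc]
        rw [this, ih cs (by simp at h; omega)]
        simp

-- foldl shapes
theorem countEq_go (i : Int) : ∀ (l : List Int) (c : Int),
    l.foldl (fun count j => if j = i then count + 1 else count) c = c + (l.count i : Int) := by
  intro l
  induction l with
  | nil => intro c; simp
  | cons v l ih =>
    intro c
    simp only [List.foldl_cons, List.count_cons]
    by_cases hv : v = i
    · rw [if_pos hv, ih]; simp [hv]; ring
    · rw [if_neg hv, ih]; simp [hv]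

theorem countEq_eq (l : List Int) (i : Int) : countEq l i = (l.count i : Int) := by
  have := countEq_go i l 0; simpa [countEq] using this

theorem countOnes_eq (l : List Int) : countOnes l = (l.count 1 : Int) := by
  have := countEq_go 1 l 0; simpa [countOnes] using this

theorem sumDiv_go (k : Int) : ∀ (l : List Int) (c : Int),
    l.foldl (fun acc r => acc + PySem.Int.floordiv r k) c
      = c + (l.map (fun r => PySem.Int.floordiv r k)).sum := by
  intro l
  induction l with
  | nil => intro c; simp
  | cons v l ih => intro c; simp only [List.foldl_cons, List.map_cons, List.sum_cons]; rw [ih]; ring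

theorem sumDiv_eq (l : List Int) (k : Int) :
    sumDiv l k = (l.map (fun r => PySem.Int.floordiv r k)).sum := by
  have := sumDiv_go k l 0; simpa [sumDiv] using this

theorem buildTemp_go (i : Int) : ∀ (l : List Int) (acc : List Int),
    l.foldl (fun temp v =>
      if v ≥ i ∧ i > 1 then temp ++ PySem.List.pyRepeat [i] (PySem.Int.floordiv v i)
      else temp ++ [v]) acc
    = acc ++ l.flatMap (fun v =>
        if v ≥ i ∧ i > 1 then PySem.List.pyRepeat [i] (PySem.Int.floordiv v i) else [v]) := by
  intro l
  induction l with
  | nil => intro acc; simp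
  | cons v l ih =>
    intro acc
    simp only [List.foldl_cons, List.flatMap_cons]
    split <;> rw [ih] <;> simp

theorem buildTemp_eq (l : List Int) (i : Int) :
    buildTemp l i = l.flatMap (fun v =>
      if v ≥ i ∧ i > 1 then PySem.List.pyRepeat [i] (PySem.Int.floordiv v i) else [v]) := by
  have := buildTemp_go i l []; simpa [buildTemp] using this

-- count of i in the temp list = sum of floor-divisions, for level i ≥ 2 over nonneg entries
theorem countTemp_eq (i : Int) (hi : 2 ≤ i) :
    ∀ l : List Int, (∀ v ∈ l, 0 ≤ v) →
      countEq (buildTemp l i) i = (l.map (fun v => PySem.Int.floordiv v i)).sum := by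
  intro l hl
  rw [countEq_eq, buildTemp_eq]
  induction l with
  | nil => simp
  | cons v l ih =>
    have hv : 0 ≤ v := hl v (by simp)
    have hfd : 0 ≤ PySem.Int.floordiv v i := by
      rw [PySem.Int.floordiv_eq_ediv_of_pos (by omega)]
      exact Int.ediv_nonneg hv (by omega)
    simp only [List.flatMap_cons, List.count_append, List.map_cons, List.sum_cons]
    push_cast
    rw [ih (fun w hw => hl w (by simp [hw]))]
    by_cases hge : v ≥ i
    · rw [if_pos ⟨hge, by omega⟩]
      rw [PySem.List.pyRepeat_singleton]
      rw [List.count_replicate_self]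
      push_cast [Int.toNat_of_nonneg hfd]
      ring
    · rw [if_neg (by tauto)]
      have hz : PySem.Int.floordiv v i = 0 := by
        rw [PySem.Int.floordiv_eq_ediv_of_pos (by omega)]
        exact Int.ediv_eq_zero_of_lt hv (by omega)
      have : v ≠ i := by omega
      simp [this, hz]

-- the exact-count pass never exceeds the temp-count pass (level i ≥ 2, nonneg entries)
theorem countEq_le_countTemp (i : Int) (hi : 2 ≤ i) (l : List Int) (hl : ∀ v ∈ l, 0 ≤ v) :
    countEq l i ≤ countEq (buildTemp l i) i := by
  rw [countEq_eq, countTemp_eq i hi l hl]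
  induction l with
  | nil => simp
  | cons v l ih =>
    have hv : 0 ≤ v := hl v (by simp)
    simp only [List.count_cons, List.map_cons, List.sum_cons]
    have ihr := ih (fun w hw => hl w (by simp [hw]))
    by_cases hvi : v = i
    · subst hvi
      have h1 : PySem.Int.floordiv v v = 1 := by
        rw [PySem.Int.floordiv_eq_ediv_of_pos (by omega)]
        exact Int.ediv_self (by omega)
      simp only [beq_self_eq_true, if_true, h1]
      push_cast
      omega
    · have hfd : 0 ≤ PySem.Int.floordiv v i := by
        rw [PySem.Int.floordiv_eq_ediv_of_pos (by omega)]
        exact Int.ediv_nonneg hv (by omega)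
      simp only [beq_iff_eq, hvi, if_false]
      push_cast
      omega

-- dropping the zeros does not change a floor-division sum
theorem sum_filter_ne_zero (f : Int → Int) (hf : f 0 = 0) (l : List Int) :
    ((l.filter (fun v => v ≠ 0)).map f).sum = (l.map f).sum := by
  induction l with
  | nil => simp
  | cons v l ih =>
    simp only [ne_eq, decide_not] at ih ⊢
    by_cases hv : v = 0
    · subst hv; simpa [hf] using ih
    · rw [List.filter_cons_of_pos (by simpa using hv)]
      simp [ih]

theorem level1_temp (l : List Int) : buildTemp l 1 = l := by
  rw [buildTemp_eq]
  induction l with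
  | nil => simp
  | cons v l ih =>
    simp only [List.flatMap_cons]
    rw [if_neg (by omega : ¬ (v ≥ 1 ∧ (1:Int) > 1))]
    simp [ih]

theorem pyRange_4_0 : PySem.List.pyRange 4 0 (-1) = [4, 3, 2, 1] := by decide

theorem collapse_if {α : Type} (c1 c2 : Prop) [Decidable c1] [Decidable c2]
    (h : c1 → c2) (r x : α) :
    (if c1 then r else if c2 then r else x) = (if c2 then r else x) := by
  by_cases h1 : c1
  · rw [if_pos h1, if_pos (h h1)]
  · rw [if_neg h1]

-- ===== VERDICT (by name: the statement is the Claim_ definition above) =====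
theorem numg_calc_spec : Claim_equal_numg_calc := by
  intro seq _
  unfold Spec_numg_calc numg_calc numg_calc_alt
  set s := seq.toList with hs
  have hscore : numgOuter s 0 [] = scoreL s := by
    simpa using numgOuter_eq s s.length 0 [] (by omega)
  have hruns : gruns s = (scoreL s).filter (fun v => v ≠ 0) := by
    rw [gruns_eq]; exact runsSpec_eq_filter s.length s (le_refl _)
  set score := scoreL s with hscdef
  have hnn : ∀ v ∈ score, 0 ≤ v := scoreL_nonneg s.length s (le_refl _)
  have hnnf : ∀ v ∈ score.filter (fun v => v ≠ 0), 0 ≤ v :=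
    fun v hv => hnn v (List.mem_of_mem_filter hv)
  -- per-level identities
  have hsum : ∀ k : Int, 2 ≤ k →
      sumDiv (score.filter (fun v => v ≠ 0)) k = countEq (buildTemp score k) k := by
    intro k hk
    rw [sumDiv_eq, countTemp_eq k hk score hnn,
        sum_filter_ne_zero _ (by rw [PySem.Int.floordiv_eq_ediv_of_pos (by omega)]; simp)]
  have hone : countOnes (score.filter (fun v => v ≠ 0)) = countEq score 1 := by
    rw [countOnes_eq, countEq_eq, List.count_filter]
    simp
  rw [hscore, hruns, pyRange_4_0]
  simp only [searchA, findK]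
  rw [collapse_if _ _ (fun h => le_trans h (countEq_le_countTemp 4 (by omega) score hnn)) _ _]
  rw [collapse_if _ _ (fun h => le_trans h (countEq_le_countTemp 3 (by omega) score hnn)) _ _]
  rw [collapse_if _ _ (fun h => le_trans h (countEq_le_countTemp 2 (by omega) score hnn)) _ _]
  rw [hsum 4 (by omega), hsum 3 (by omega), hsum 2 (by omega), hone]
  rw [level1_temp]
  by_cases h4 : countEq (buildTemp score 4) 4 ≥ 4 <;>
    by_cases h3 : countEq (buildTemp score 3) 3 ≥ 4 <;>
      by_cases h2 : countEq (buildTemp score 2) 2 ≥ 4 <;>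
        by_cases h1 : countEq score 1 ≥ 4 <;>
          simp [h4, h3, h2, h1]
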